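-- pv_equiv track=rewrite | github.com/TronPaul/perler | perler/img.py | find_left_edge
-- ===== SOURCE A (Python) =====
-- import math
--
-- def find_left_edge(row, rgb=None):
--     middle = math.ceil(len(row) / 2)
--     max_trans = None
--     for x in range(middle, -1, -1):
--         pixel = row[x]
--         # Maybe contiguous transparency
--         if pixel == rgb and max_trans is None:
--             max_trans = x
--         # Not contiguous transparency
--         elif pixel != rgb and max_trans is not None:
--             max_trans = None
--             break
--     return max_trans
-- ===== SOURCE B (Python) =====
-- import math
--
-- def find_left_edge(row, rgb=None):
--     middle = math.ceil(len(row) / 2)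
--     # forward pass: length of the matching prefix run
--     k = 0
--     while k < len(row) and row[k] == rgb:
--         k += 1
--     if k == 0:
--         return None
--     if k > middle:
--         return middle
--     # a stray match above the contiguous prefix kills the result
--     for x in range(k + 1, middle + 1):
--         if row[x] == rgb:
--             return None
--     return k - 1
-- ===== Notes on version B (the rewrite author's own statement) =====
-- stated objective: alternative
-- what changed: Replaces A's stateful downward scan from the middle (carrying max_trans with a reset-and-break) by a forward left-to-right pass measuring the matching prefix run length k, then a closed-form decision: middle if k exceeds it, None if a stray match sits above the run, else k-1.
-- outside the precondition, e.g. on find_left_edge([], None): A raises IndexError, B returns None; on find_left_edge([None], None): A raises IndexError, B returns 0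
import Mathlib
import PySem

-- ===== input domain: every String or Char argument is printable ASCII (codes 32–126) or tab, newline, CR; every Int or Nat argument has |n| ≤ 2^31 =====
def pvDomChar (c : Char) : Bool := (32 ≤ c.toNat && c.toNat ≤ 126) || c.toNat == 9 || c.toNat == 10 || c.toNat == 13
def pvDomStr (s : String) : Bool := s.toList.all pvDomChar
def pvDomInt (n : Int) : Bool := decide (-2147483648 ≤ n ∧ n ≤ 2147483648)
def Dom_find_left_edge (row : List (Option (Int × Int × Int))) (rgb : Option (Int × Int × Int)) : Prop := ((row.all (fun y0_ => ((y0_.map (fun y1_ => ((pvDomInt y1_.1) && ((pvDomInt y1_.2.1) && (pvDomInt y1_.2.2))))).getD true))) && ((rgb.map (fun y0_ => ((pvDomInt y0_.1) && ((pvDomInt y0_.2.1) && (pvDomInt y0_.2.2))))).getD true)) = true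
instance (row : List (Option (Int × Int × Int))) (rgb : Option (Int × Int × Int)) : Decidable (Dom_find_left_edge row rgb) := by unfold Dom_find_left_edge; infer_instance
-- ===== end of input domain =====

-- B replaces A's stateful downward scan from the middle with a forward pass measuring the
-- matching prefix run length plus a closed-form decision; same cost, different traversal.
-- Return values only; neither program mutates its arguments.

-- ===== PORT A =====
-- for x in range(middle, -1, -1): stateful loop carrying max_trans, with break
def fleLoopA (row : List (Option (Int × Int × Int))) (rgb : Option (Int × Int × Int)) :
    List Int → Option Int → Option Int
  | [], mt => mt
  | x :: xs, mt =>
    match PySem.List.pyGet? row x with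
    | none => none  -- IndexError path (excluded by Pre_)
    | some pixel =>
      if pixel = rgb ∧ mt = none then fleLoopA row rgb xs (some x)
      else if pixel ≠ rgb ∧ mt ≠ none then none  -- max_trans = None; break
      else fleLoopA row rgb xs mt

def find_left_edge (row : List (Option (Int × Int × Int))) (rgb : Option (Int × Int × Int)) : Option Int :=
  let middle : Int := ((row.length + 1) / 2 : Nat)  -- math.ceil(len(row)/2)
  fleLoopA row rgb (PySem.List.pyRange middle (-1) (-1)) none

-- ===== PORT B =====
-- while k < len(row) and row[k] == rgb: k += 1   (forward prefix-run length)
def fleRun (rgb : Option (Int × Int × Int)) : List (Option (Int × Int × Int)) → Nat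
  | [] => 0
  | p :: rest => if p = rgb then fleRun rgb rest + 1 else 0

def find_left_edge_alt (row : List (Option (Int × Int × Int))) (rgb : Option (Int × Int × Int)) : Option Int :=
  let middle : Int := ((row.length + 1) / 2 : Nat)  -- math.ceil(len(row)/2)
  let k : Int := (fleRun rgb row : Nat)
  if k = 0 then none
  else if middle < k then some middle
  -- for x in range(k+1, middle+1): if row[x] == rgb: return None  (indices in range on Pre_)
  else if (PySem.List.pyRange (k + 1) (middle + 1) 1).any
            (fun x => PySem.List.pyGet? row x == some rgb) then none
  else some (k - 1)

-- ===== PRECONDITION & SPEC =====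
-- Pre_ excludes rows of length 0 or 1, on which Python A raises IndexError (row[middle] is out of range).
def Pre_find_left_edge (row : List (Option (Int × Int × Int))) (rgb : Option (Int × Int × Int)) : Prop :=
  2 ≤ row.length
instance (row : List (Option (Int × Int × Int))) (rgb : Option (Int × Int × Int)) : Decidable (Pre_find_left_edge row rgb) := by unfold Pre_find_left_edge; infer_instance

def pvWitness_find_left_edge : (List (Option (Int × Int × Int))) × (Option (Int × Int × Int)) :=
  ([some (1, 2, 3), none, some (1, 2, 3)], none)

def Spec_find_left_edge (row : List (Option (Int × Int × Int))) (rgb : Option (Int × Int × Int)) (out : Option Int) : Prop := out = find_left_edge_alt row rgb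
instance (row : List (Option (Int × Int × Int))) (rgb : Option (Int × Int × Int)) (out : Option Int) : Decidable (Spec_find_left_edge row rgb out) := by unfold Spec_find_left_edge; infer_instance

-- ===== CLAIM (what is proved, stated in full; the proofs are below) =====
def Claim_equal_find_left_edge : Prop := ∀ (row : List (Option (Int × Int × Int))) (rgb : Option (Int × Int × Int)), Dom_find_left_edge row rgb → Pre_find_left_edge row rgb → Spec_find_left_edge row rgb (find_left_edge row rgb)

-- ===== LEMMAS AND PROOFS =====

-- proof-side helper: the first matching index scanning the given countdown list
def fleFirst (row : List (Option (Int × Int × Int))) (rgb : Option (Int × Int × Int)) :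
    List Int → Option Int
  | [] => none
  | x :: xs =>
    match PySem.List.pyGet? row x with
    | none => none
    | some pixel => if pixel = rgb then some x else fleFirst row rgb xs

-- Once max_trans is set to p, A's loop returns p iff every remaining pixel matches rgb.
theorem fleLoopA_some (row : List (Option (Int × Int × Int))) (rgb : Option (Int × Int × Int))
    (xs : List Int) (p : Int) :
    fleLoopA row rgb xs (some p)
      = if xs.all (fun i => PySem.List.pyGet? row i == some rgb) then some p else none := by
  induction xs with
  | nil => simp [fleLoopA]
  | cons x xs ih =>
    cases h : PySem.List.pyGet? row x with
    | none => simp [fleLoopA, h]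
    | some pixel =>
      by_cases hpr : pixel = rgb
      · subst hpr; simp [fleLoopA, h, ih]
      · simp [fleLoopA, h, hpr]

-- A's downward scan from n equals "find first match from n, then verify the prefix below it".
theorem fleLoopA_eq_fv (row : List (Option (Int × Int × Int))) (rgb : Option (Int × Int × Int))
    (n : Nat) :
    fleLoopA row rgb (PySem.List.pyRange (n : Int) (-1) (-1)) none
      = match fleFirst row rgb (PySem.List.pyRange (n : Int) (-1) (-1)) with
        | none => none
        | some p =>
          if (PySem.List.pyRange 0 p 1).all (fun i => PySem.List.pyGet? row i == some rgb)
          then some p else none := by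
  induction n with
  | zero =>
    rw [PySem.List.pyRange_neg_one_cons (by norm_num),
        PySem.List.pyRange_neg_one_eq_nil (by norm_num)]
    cases h : PySem.List.pyGet? row 0 with
    | none => simp [fleLoopA, fleFirst, h]
    | some pixel =>
      by_cases hpr : pixel = rgb
      · subst hpr; simp [fleLoopA, fleFirst, h]
      · simp [fleLoopA, fleFirst, h, hpr]
  | succ m ih =>
    have hm1 : (-1 : Int) < ((m + 1 : Nat) : Int) := by push_cast; omega
    rw [PySem.List.pyRange_neg_one_cons hm1]
    push_cast
    rw [show ((m : Int) + 1 - 1) = (m : Int) from by ring]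
    have hrev : PySem.List.pyRange (m : Int) (-1) (-1)
        = (PySem.List.pyRange 0 ((m : Int) + 1) 1).reverse := by
      rw [PySem.List.pyRange_neg_one_eq_reverse]; norm_num
    cases h : PySem.List.pyGet? row ((m : Int) + 1) with
    | none => simp [fleLoopA, fleFirst, h]
    | some pixel =>
      by_cases hpr : pixel = rgb
      · subst hpr
        simp [fleLoopA, fleFirst, h, fleLoopA_some, hrev, List.all_reverse]
      · simp [fleLoopA, fleFirst, h, hpr, ih]

-- fleRun facts
theorem fleRun_get (rgb : Option (Int × Int × Int)) (row : List (Option (Int × Int × Int)))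
    (i : Nat) (h : i < fleRun rgb row) : row[i]? = some rgb := by
  induction row generalizing i with
  | nil => simp [fleRun] at h
  | cons p rest ih =>
    by_cases hp : p = rgb
    · cases i with
      | zero => simp [hp]
      | succ j =>
        simp [fleRun, hp] at h
        simpa using ih j (by omega)
    · simp [fleRun, hp] at h

theorem fleRun_ne (rgb : Option (Int × Int × Int)) (row : List (Option (Int × Int × Int)))
    (h : fleRun rgb row < row.length) : row[fleRun rgb row]? ≠ some rgb := by
  induction row with
  | nil => simp [fleRun] at h
  | cons p rest ih =>
    by_cases hp : p = rgb
    · simp only [fleRun, hp, if_pos rfl]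
      simpa using ih (by simpa [fleRun, hp] using h)
    · simpa [fleRun, hp] using hp

-- the prefix-verify condition is exactly "m ≤ run length", for m ≤ len
theorem fle_all_iff (rgb : Option (Int × Int × Int)) (row : List (Option (Int × Int × Int)))
    (m : Nat) (hm : m ≤ row.length) :
    ((PySem.List.pyRange 0 (m : Int) 1).all
        (fun i => PySem.List.pyGet? row i == some rgb) = true)
      ↔ m ≤ fleRun rgb row := by
  constructor
  · intro hall
    by_contra hlt
    push_neg at hlt
    have hk : fleRun rgb row < row.length := by omega
    have hmem : ((fleRun rgb row : Nat) : Int) ∈ PySem.List.pyRange 0 (m : Int) 1 := by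
      rw [PySem.List.mem_pyRange_one]; constructor <;> [positivity; exact_mod_cast hlt]
    have := List.all_eq_true.mp hall _ hmem
    rw [PySem.List.pyGet?_natCast] at this
    exact fleRun_ne rgb row hk (by simpa using this)
  · intro hle
    rw [List.all_eq_true]
    intro i hi
    rw [PySem.List.mem_pyRange_one] at hi
    obtain ⟨h0, hiM⟩ := hi
    obtain ⟨j, rfl⟩ : ∃ j : Nat, i = (j : Int) := ⟨i.toNat, by omega⟩
    rw [PySem.List.pyGet?_natCast]
    have : j < fleRun rgb row := by omega
    simp [fleRun_get rgb row j this]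

-- "find first match from n, then verify" equals B's closed-form decision from the run length.
theorem fle_fv_eq_alt (row : List (Option (Int × Int × Int))) (rgb : Option (Int × Int × Int))
    (n : Nat) (hn : n < row.length) :
    (match fleFirst row rgb (PySem.List.pyRange (n : Int) (-1) (-1)) with
     | none => none
     | some p =>
       if (PySem.List.pyRange 0 p 1).all (fun i => PySem.List.pyGet? row i == some rgb)
       then some p else none)
      = (if (fleRun rgb row : Int) = 0 then none
         else if (n : Int) < (fleRun rgb row : Int) then some (n : Int)
         else if (PySem.List.pyRange ((fleRun rgb row : Int) + 1) ((n : Int) + 1) 1).any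
                   (fun x => PySem.List.pyGet? row x == some rgb) then none
         else some ((fleRun rgb row : Int) - 1)) := by
  induction n with
  | zero =>
    rw [PySem.List.pyRange_neg_one_cons (by norm_num),
        PySem.List.pyRange_neg_one_eq_nil (by norm_num)]
    have h0 : PySem.List.pyGet? row 0 = row[0]? := by
      simpa using PySem.List.pyGet?_natCast (xs := row) (n := 0)
    by_cases hk : fleRun rgb row = 0
    · have hne : row[0]? ≠ some rgb := by simpa [hk] using fleRun_ne rgb row (by omega)
      cases hget : row[0]? with
      | none => rw [List.getElem?_eq_none_iff] at hget; omega
      | some pixel =>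
        have hpr : pixel ≠ rgb := by intro e; exact hne (by simp [hget, e])
        simp [fleFirst, h0, hget, hpr, hk]
    · have hmatch : row[0]? = some rgb := fleRun_get rgb row 0 (by omega)
      have hlt : (0 : Int) < (fleRun rgb row : Int) := by exact_mod_cast Nat.pos_of_ne_zero hk
      simp [fleFirst, h0, hmatch, PySem.List.pyRange_zero, hk, hlt]
  | succ m ih =>
    have hm1 : (-1 : Int) < ((m + 1 : Nat) : Int) := by push_cast; omega
    rw [PySem.List.pyRange_neg_one_cons hm1]
    push_cast
    rw [show ((m : Int) + 1 - 1) = (m : Int) from by ring]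
    have hsm : PySem.List.pyGet? row ((m : Int) + 1) = row[m + 1]? := by
      have := PySem.List.pyGet?_natCast (xs := row) (n := m + 1)
      push_cast at this; exact this
    have hmlt : m < row.length := by omega
    cases hget : row[m + 1]? with
    | none => rw [List.getElem?_eq_none_iff] at hget; omega
    | some pixel =>
      by_cases hpr : pixel = rgb
      · -- row[m+1] matches rgb
        have hget' : row[m + 1]? = some rgb := hpr ▸ hget
        have hk1 : fleRun rgb row ≠ m + 1 := fun e => fleRun_ne rgb row (by omega) (e ▸ hget')
        by_cases hbig : m + 2 ≤ fleRun rgb row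
        · have hall' : ((PySem.List.pyRange 0 ((m : Int) + 1) 1).all
              (fun i => PySem.List.pyGet? row i == some rgb) = true) := by
            have h := (fle_all_iff rgb row (m + 1) (by omega)).mpr (by omega)
            push_cast at h; exact h
          have hknat : fleRun rgb row ≠ 0 := by omega
          have hlt : (m : Int) + 1 < (fleRun rgb row : Int) := by
            exact_mod_cast (by omega : m + 1 < fleRun rgb row)
          simp [fleFirst, hsm, hget', hall', hknat, hlt]
        · -- run length ≤ m: prefix check fails; the stray-match scan finds m+1
          have hkle : fleRun rgb row ≤ m := by omega
          have hallf : ¬ ((PySem.List.pyRange 0 ((m : Int) + 1) 1).all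
              (fun i => PySem.List.pyGet? row i == some rgb) = true) := by
            intro hall
            have h := (fle_all_iff rgb row (m + 1) (by omega))
            push_cast at h
            have := h.mp hall
            omega
          by_cases hk : fleRun rgb row = 0
          · simp [fleFirst, hsm, hget', hallf, hk]
          · have hnlt : ¬ ((m : Int) + 1 < (fleRun rgb row : Int)) := by
              have : (fleRun rgb row : Int) ≤ (m : Int) := by exact_mod_cast hkle
              omega
            have hmem : ((m : Int) + 1) ∈
                PySem.List.pyRange ((fleRun rgb row : Int) + 1) ((m : Int) + 1 + 1) 1 := by
              rw [PySem.List.mem_pyRange_one]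
              have : (fleRun rgb row : Int) ≤ (m : Int) := by exact_mod_cast hkle
              omega
            have hany : (PySem.List.pyRange ((fleRun rgb row : Int) + 1) ((m : Int) + 1 + 1) 1).any
                (fun x => PySem.List.pyGet? row x == some rgb) = true := by
              rw [List.any_eq_true]
              exact ⟨_, hmem, by simp [hsm, hget']⟩
            simp [fleFirst, hsm, hget', hallf, hk, hnlt, hany]
      · -- row[m+1] ≠ rgb: A-side recurses; B-side formula is unchanged
        simp only [fleFirst, hsm, hget]
        rw [if_neg hpr, ih hmlt]
        have hkle : fleRun rgb row ≤ m + 1 := by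
          by_contra hgt
          exact hpr (by have := fleRun_get rgb row (m + 1) (by omega); rw [hget] at this; injection this)
        by_cases hk : fleRun rgb row = 0
        · simp [hk]
        · by_cases heq : fleRun rgb row = m + 1
          · have hlt : (m : Int) < (fleRun rgb row : Int) := by
              exact_mod_cast (by omega : m < fleRun rgb row)
            have hcast : (fleRun rgb row : Int) = (m : Int) + 1 := by exact_mod_cast heq
            have hnlt : ¬ ((m : Int) + 1 < (fleRun rgb row : Int)) := by omega
            have hempty : PySem.List.pyRange ((fleRun rgb row : Int) + 1) ((m : Int) + 1 + 1) 1 = [] := by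
              rw [hcast, PySem.List.pyRange_one]
              norm_num
            have hval : ((fleRun rgb row : Int) - 1) = (m : Int) := by omega
            simp [hk, hlt, hnlt, hempty, hval]
          · have hkle' : fleRun rgb row ≤ m := by omega
            have hcle : (fleRun rgb row : Int) ≤ (m : Int) := by exact_mod_cast hkle'
            have hnlt1 : ¬ ((m : Int) < (fleRun rgb row : Int)) := by omega
            have hnlt2 : ¬ ((m : Int) + 1 < (fleRun rgb row : Int)) := by omega
            have hsplit : PySem.List.pyRange ((fleRun rgb row : Int) + 1) ((m : Int) + 1 + 1) 1
                = PySem.List.pyRange ((fleRun rgb row : Int) + 1) ((m : Int) + 1) 1 ++ [((m : Int) + 1)] := by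
              exact PySem.List.pyRange_one_succ_right (by omega)
            have hlast : (PySem.List.pyGet? row ((m : Int) + 1) == some rgb) = false := by
              simp [hsm, hget, hpr]
            rw [hsplit, List.any_append]
            simp only [List.any_cons, List.any_nil, hlast, Bool.or_false]
            rw [if_neg hnlt1, if_neg hnlt2]

-- ===== VERDICT (by name: the statement is the Claim_ definition above) =====
theorem find_left_edge_spec : Claim_equal_find_left_edge := by
  intro row rgb _ hpre
  unfold Pre_find_left_edge at hpre
  unfold Spec_find_left_edge find_left_edge find_left_edge_alt
  have hmid : ((row.length + 1) / 2 : Nat) < row.length := by omega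
  calc fleLoopA row rgb (PySem.List.pyRange (((row.length + 1) / 2 : Nat) : Int) (-1) (-1)) none
      = _ := fleLoopA_eq_fv row rgb ((row.length + 1) / 2)
    _ = _ := fle_fv_eq_alt row rgb ((row.length + 1) / 2) hmid
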